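-- pv_equiv track=rewrite | github.com/jeganpillai/python_reference | p0022_convert_string_to_integer.py | Grow_With_Data
-- ===== SOURCE A (Python) =====
-- def Grow_With_Data(str):
--     str = str.strip()
--
--     if len(str) < 1 or str == '-' or str == '+':
--         return 0
--     sign = 1
--     if str[0] in ['-','+']:
--         if str[0] == '-':
--             sign = -1
--         str = str[1:]
--     result = 0
--
--     for i in range(len(str)):
--         if not str[0].isdigit():
--             break
--
--         if str[i].isdigit():
--             result = result*10 + int(str[i])
--         else:
--             break
--     # return 0 if result * sign < -2**31 or result * sign > (2 ** 31 - 1) else result * sign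
--     return max(-2**31, min(result * sign, 2**31-1))
-- ===== SOURCE B (Python) =====
-- def Grow_With_Data(str):
--     s = str.strip()
--     neg = s.startswith('-')
--     body = s[1:] if s[:1] in ('+', '-') else s
--     n = len(body)
--     for k, c in enumerate(body):
--         if not c.isdigit():
--             n = k
--             break
--     if n == 0:
--         return 0
--     v = 0
--     p = 1
--     for c in reversed(body[:n]):
--         v += (ord(c) - 48) * p
--         p *= 10
--     if neg:
--         v = -v
--     return max(-2**31, min(v, 2**31 - 1))
-- ===== Notes on version B (the rewrite author's own statement) =====
-- stated objective: alternative
-- what changed: A accumulates the number left-to-right inside the scan (Horner: result = result*10 + digit, re-testing the first char each iteration) and multiplies by a sign flag; B first finds the end of the leading digit run, slices it out, and sums it right-to-left with an explicit power-of-ten weight, negating at the end.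
import Mathlib
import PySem

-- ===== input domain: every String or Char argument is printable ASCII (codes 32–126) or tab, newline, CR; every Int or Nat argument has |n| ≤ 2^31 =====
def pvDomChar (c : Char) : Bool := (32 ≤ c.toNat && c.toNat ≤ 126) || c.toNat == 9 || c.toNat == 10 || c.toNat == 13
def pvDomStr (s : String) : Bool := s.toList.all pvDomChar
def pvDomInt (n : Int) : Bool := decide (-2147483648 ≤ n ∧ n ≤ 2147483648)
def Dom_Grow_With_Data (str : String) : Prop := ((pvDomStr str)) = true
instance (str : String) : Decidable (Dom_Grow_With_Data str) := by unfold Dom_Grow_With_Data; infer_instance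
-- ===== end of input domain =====

-- B replaces A's forward per-character Horner accumulation (with its re-checked first-char
-- break) by slice-out-the-digit-run, then a right-to-left positional sum with an explicit
-- power-of-ten weight; objective: alternative (same cost, different algorithm).

-- ===== PORT A =====
-- A's for-loop over range(len(str)) with break: walks the chars left to right; the
-- 'not str[0].isdigit()' break re-tests the (fixed) first char each iteration, passed as fd.
-- int(str[i]) on a digit char is its digit value, ported by hand as (c.toNat - 48) (exact for
-- '0'..'9', guarded by isdigit).
def pvALoop (fd : Bool) : List Char → Int → Int
  | [], result => result
  | c :: rest, result =>
    if fd = false then result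
    else if PySem.Chars.isdigit c then pvALoop fd rest (result * 10 + ((c.toNat : Int) - 48))
    else result

def Grow_With_Data (str : String) : Int :=
  let s := (PySem.Str.strip str).toList
  if s.length < 1 ∨ s = ['-'] ∨ s = ['+'] then 0
  else
    match s with
    | [] => 0  -- unreachable: s.length ≥ 1 here
    | c0 :: rest =>
      let (sign, s') : Int × List Char :=
        if c0 = '-' ∨ c0 = '+' then (if c0 = '-' then -1 else 1, rest) else (1, c0 :: rest)
      let result := pvALoop (match s' with | [] => false | d :: _ => PySem.Chars.isdigit d) s' 0
      max (-2 ^ 31) (min (result * sign) (2 ^ 31 - 1))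

-- ===== PORT B =====
-- the enumerate-loop of B: first index whose char is not a digit, or len(body)
def pvBScan : List Char → Nat → Nat
  | [], k => k
  | c :: rest, k => if ¬ PySem.Chars.isdigit c then k else pvBScan rest (k + 1)

-- the reversed-loop of B: v += (ord(c)-48)*p; p *= 10
def pvBVal : List Char → Int → Int → Int
  | [], v, _ => v
  | c :: rest, v, p => pvBVal rest (v + ((c.toNat : Int) - 48) * p) (p * 10)

def Grow_With_Data_alt (str : String) : Int :=
  let s := (PySem.Str.strip str).toList
  let neg := PySem.Chars.startswith s ['-']
  let body := if s.take 1 = ['+'] ∨ s.take 1 = ['-'] then s.drop 1 else s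
  let n := pvBScan body 0
  if n = 0 then 0
  else
    let v := pvBVal (body.take n).reverse 0 1
    let v := if neg then -v else v
    max (-2 ^ 31) (min v (2 ^ 31 - 1))

-- ===== PRECONDITION & SPEC =====
def Spec_Grow_With_Data (str : String) (out : Int) : Prop := out = Grow_With_Data_alt str
instance (str : String) (out : Int) : Decidable (Spec_Grow_With_Data str out) := by unfold Spec_Grow_With_Data; infer_instance

-- ===== CLAIM (what is proved, stated in full; the proofs are below) =====
def Claim_equal_Grow_With_Data : Prop := ∀ (str : String), Dom_Grow_With_Data str → Spec_Grow_With_Data str (Grow_With_Data str)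

-- ===== LEMMAS AND PROOFS =====

-- A's loop with a digit first char folds exactly over the leading digit run
theorem pvALoop_true (cs : List Char) (r : Int) :
    pvALoop true cs r
      = (cs.takeWhile PySem.Chars.isdigit).foldl (fun a c => a * 10 + ((c.toNat : Int) - 48)) r := by
  induction cs generalizing r with
  | nil => simp [pvALoop]
  | cons c rest ih =>
    by_cases h : PySem.Chars.isdigit c
    · simp [pvALoop, h, ih]
    · simp [pvALoop, h]

theorem pvALoop_false (cs : List Char) (r : Int) : pvALoop false cs r = r := by
  cases cs <;> simp [pvALoop]

-- B's scan counts the leading digit run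
theorem pvBScan_eq (cs : List Char) (k : Nat) :
    pvBScan cs k = k + (cs.takeWhile PySem.Chars.isdigit).length := by
  induction cs generalizing k with
  | nil => simp [pvBScan]
  | cons c rest ih =>
    by_cases h : PySem.Chars.isdigit c
    · simp [pvBScan, h, ih]; omega
    · simp [pvBScan, h]

-- B's reversed positional sum equals the forward Horner fold
theorem pvBVal_eq_foldl (ls : List Char) (v p : Int) :
    pvBVal ls v p
      = v + (ls.reverse.foldl (fun a c => a * 10 + ((c.toNat : Int) - 48)) 0) * p := by
  induction ls generalizing v p with
  | nil => simp [pvBVal]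
  | cons c rest ih =>
    simp [pvBVal, ih, List.foldl_append]
    ring

theorem pvBVal_reverse (ds : List Char) :
    pvBVal ds.reverse 0 1 = ds.foldl (fun a c => a * 10 + ((c.toNat : Int) - 48)) 0 := by
  rw [pvBVal_eq_foldl, List.reverse_reverse]; ring

theorem pv_take_takeWhile (cs : List Char) (p : Char → Bool) :
    cs.take ((cs.takeWhile p).length) = cs.takeWhile p := by
  induction cs with
  | nil => simp
  | cons c rest ih => by_cases h : p c <;> simp [h, ih]

-- the non-zero branch, shared by all sign cases
theorem pv_digit_branch (body : List Char) :
    pvBScan body 0 = (body.takeWhile PySem.Chars.isdigit).length ∧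
    pvBVal (body.take (pvBScan body 0)).reverse 0 1
      = (body.takeWhile PySem.Chars.isdigit).foldl (fun a c => a * 10 + ((c.toNat : Int) - 48)) 0 := by
  have h := pvBScan_eq body 0
  simp only [Nat.zero_add] at h
  refine ⟨h, ?_⟩
  rw [h, pv_take_takeWhile, pvBVal_reverse]

-- the common body: for any char list s (the stripped input), A's tail = B's tail
theorem pv_core (s : List Char) :
    (if s.length < 1 ∨ s = ['-'] ∨ s = ['+'] then (0 : Int)
     else
       match s with
       | [] => 0
       | c0 :: rest =>
         let (sign, s') : Int × List Char :=
           if c0 = '-' ∨ c0 = '+' then (if c0 = '-' then -1 else 1, rest) else (1, c0 :: rest)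
         let result := pvALoop (match s' with | [] => false | d :: _ => PySem.Chars.isdigit d) s' 0
         max (-2 ^ 31) (min (result * sign) (2 ^ 31 - 1)))
    =
    (let neg := PySem.Chars.startswith s ['-']
     let body := if s.take 1 = ['+'] ∨ s.take 1 = ['-'] then s.drop 1 else s
     let n := pvBScan body 0
     if n = 0 then 0
     else
       let v := pvBVal (body.take n).reverse 0 1
       let v := if neg then -v else v
       max (-2 ^ 31) (min v (2 ^ 31 - 1))) := by
  cases s with
  | nil => simp [pvBScan]
  | cons c0 rest =>
    obtain ⟨hscan, hval⟩ := pv_digit_branch rest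
    obtain ⟨hscan', hval'⟩ := pv_digit_branch (c0 :: rest)
    by_cases hsign : c0 = '-' ∨ c0 = '+'
    · cases rest with
      | nil => rcases hsign with h | h <;> subst h <;> simp [pvBScan]
      | cons d rest' =>
        have htk : (c0 :: d :: rest').take 1 = [c0] := rfl
        have hsw : PySem.Chars.startswith (c0 :: d :: rest') ['-'] = (c0 = '-' : Bool) := by
          by_cases hc : c0 = '-'
          · subst hc
            simp [(PySem.Chars.startswith_iff ('-' :: d :: rest') ['-']).2 ⟨d :: rest', rfl⟩]
          · simp only [hc, decide_false]
            rw [← Bool.not_eq_true, PySem.Chars.startswith_iff]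
            intro hpre
            exact hc (List.cons_prefix_cons.1 hpre).1.symm
        by_cases hd : PySem.Chars.isdigit d
        · have hn : pvBScan (d :: rest') 0 ≠ 0 := by
            rw [hscan]; simp [hd]
          rcases hsign with h | h <;> subst h <;>
            simp [htk, hsw, hd, hn, hval, pvALoop_true, mul_one]
        · have hn : pvBScan (d :: rest') 0 = 0 := by
            rw [hscan]; simp [hd]
          have hfd : pvALoop (PySem.Chars.isdigit d) (d :: rest') 0 = 0 := by
            simp only [hd]; exact pvALoop_false _ _
          rcases hsign with h | h <;> subst h <;>
            simp [htk, hn, hfd]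
    · obtain ⟨hm, hp⟩ := not_or.1 hsign
      have htk : (c0 :: rest).take 1 = [c0] := rfl
      have hsw : PySem.Chars.startswith (c0 :: rest) ['-'] = false := by
        rw [← Bool.not_eq_true, PySem.Chars.startswith_iff]
        intro hpre
        exact hm (List.cons_prefix_cons.1 hpre).1.symm
      by_cases hd : PySem.Chars.isdigit c0
      · have hn : pvBScan (c0 :: rest) 0 ≠ 0 := by
          rw [hscan']; simp [hd]
        simp [htk, hsw, hd, hn, hval', pvALoop_true, mul_one, hm, hp]
      · have hn : pvBScan (c0 :: rest) 0 = 0 := by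
          rw [hscan']; simp [hd]
        have hfd : pvALoop (PySem.Chars.isdigit c0) (c0 :: rest) 0 = 0 := by
          simp only [hd]; exact pvALoop_false _ _
        simp [htk, hn, hfd, hm, hp]

-- ===== VERDICT (by name: the statement is the Claim_ definition above) =====
theorem Grow_With_Data_spec : Claim_equal_Grow_With_Data := by
  intro str _
  unfold Spec_Grow_With_Data Grow_With_Data Grow_With_Data_alt
  exact pv_core (PySem.Str.strip str).toList
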